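-- pv_equiv track=rewrite | github.com/alangpierce/tinyquery | tinyquery/runtime.py | _parse_property_name
-- ===== SOURCE A (Python) =====
-- def _parse_property_name(json_path):
--     if json_path[0] != '.':
--         raise ValueError(
--             'Invalid json path expression. Was expecting a "." '
--             'before %s' % json_path)
--     if len(json_path) == 1:
--         raise ValueError(
--             'Invalid json path expression. Cannot end in ".".')
--     prop_name_plus = json_path[1:]
--     next_separator_positions = [
--         pos
--         for pos in [prop_name_plus.find('.'), prop_name_plus.find('[')]
--         if pos != -1
--     ]
--
--     if next_separator_positions:
--         end_idx = min(next_separator_positions)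
--         return prop_name_plus[:end_idx], prop_name_plus[end_idx:]
--     else:
--         return prop_name_plus, ''
-- ===== SOURCE B (Python) =====
-- def _parse_property_name(json_path):
--     if json_path[0] != '.':
--         raise ValueError(
--             'Invalid json path expression. Was expecting a "." '
--             'before %s' % json_path)
--     if len(json_path) == 1:
--         raise ValueError(
--             'Invalid json path expression. Cannot end in ".".')
--     prop_name_plus = json_path[1:]
--     for i, ch in enumerate(prop_name_plus):
--         if ch == '.' or ch == '[':
--             return prop_name_plus[:i], prop_name_plus[i:]
--     return prop_name_plus, ''
-- ===== Notes on version B (the rewrite author's own statement) =====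
-- stated objective: alternative
-- what changed: Replaces the two full find scans ('.' and '[') plus list-filter-and-min with one short-circuiting enumerate scan that stops at the first separator and slices there.
import Mathlib
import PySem

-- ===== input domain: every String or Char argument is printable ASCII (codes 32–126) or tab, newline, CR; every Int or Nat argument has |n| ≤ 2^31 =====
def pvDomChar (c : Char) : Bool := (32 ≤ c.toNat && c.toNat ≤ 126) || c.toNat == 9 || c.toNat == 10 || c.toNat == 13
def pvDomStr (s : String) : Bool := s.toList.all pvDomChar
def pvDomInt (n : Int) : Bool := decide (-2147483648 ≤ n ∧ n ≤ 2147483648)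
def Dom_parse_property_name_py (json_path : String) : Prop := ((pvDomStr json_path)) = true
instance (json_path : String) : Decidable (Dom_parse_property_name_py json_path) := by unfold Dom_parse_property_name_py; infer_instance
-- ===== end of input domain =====

-- B replaces A's two full `find` scans plus filter-and-min with one short-circuiting
-- scan that stops at the first '.' or '[' separator (return values only; both raise
-- identically on the inputs Pre_ excludes).

-- ===== PORT A =====
-- A raises in its guard branches; the port returns ("","") there and Pre_
-- excludes those inputs.
def parse_property_name_py (json_path : String) : String × String :=
  match PySem.Str.pyGet? json_path 0 with
  | none => ("", "")                                  -- IndexError on json_path[0]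
  | some c0 =>
    if c0 ≠ '.' then ("", "")                         -- raise ValueError
    else if PySem.Str.len json_path = 1 then ("", "") -- raise ValueError
    else
      let prop_name_plus := PySem.Str.slice json_path (some 1) none
      let next_separator_positions :=
        ([PySem.Str.find prop_name_plus ".", PySem.Str.find prop_name_plus "["].filter
          (fun pos => pos ≠ -1))
      match PySem.List.min? next_separator_positions (fun x => x) with
      | some end_idx =>
          (PySem.Str.slice prop_name_plus none (some end_idx),
           PySem.Str.slice prop_name_plus (some end_idx) none)
      | none => (prop_name_plus, "")

-- ===== PORT B =====
-- break at the first character that is '.' or '[': everything before it / from it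
def altScan : List Char → List Char × List Char
  | [] => ([], [])
  | c :: cs =>
    if c = '.' ∨ c = '[' then ([], c :: cs)
    else
      let r := altScan cs
      (c :: r.1, r.2)

def parse_property_name_py_alt (json_path : String) : String × String :=
  match PySem.Str.pyGet? json_path 0 with
  | none => ("", "")
  | some c0 =>
    if c0 ≠ '.' then ("", "")
    else if PySem.Str.len json_path = 1 then ("", "")
    else
      let r := altScan json_path.toList.tail
      (String.ofList r.1, String.ofList r.2)

-- ===== PRECONDITION & SPEC =====
-- Pre_ excludes exactly the inputs on which A raises (B raises identically there):
-- strings whose first character is missing or not a period, and strings of length one.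
def Pre_parse_property_name_py (json_path : String) : Prop :=
  PySem.Str.startswith json_path "." = true ∧ PySem.Str.len json_path ≠ 1
instance (json_path : String) : Decidable (Pre_parse_property_name_py json_path) := by
  unfold Pre_parse_property_name_py; infer_instance
def pvWitness_parse_property_name_py : String := ".abc[0]"

def Spec_parse_property_name_py (json_path : String) (out : String × String) : Prop :=
  out = parse_property_name_py_alt json_path
instance (json_path : String) (out : String × String) :
    Decidable (Spec_parse_property_name_py json_path out) := by
  unfold Spec_parse_property_name_py; infer_instance

-- ===== CLAIM (what is proved, stated in full; the proofs are below) =====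
def Claim_equal_parse_property_name_py : Prop :=
  ∀ (json_path : String), Dom_parse_property_name_py json_path →
    Pre_parse_property_name_py json_path →
    Spec_parse_property_name_py json_path (parse_property_name_py json_path)

-- ===== LEMMAS AND PROOFS =====

-- proof-side name for "not a separator"
def notSep (c : Char) : Bool := !decide (c = '.') && !decide (c = '[')

theorem notSep_false_iff (c : Char) : notSep c = false ↔ (c = '.' ∨ c = '[') := by
  simp [notSep]; tauto

theorem notSep_true_iff (c : Char) : notSep c = true ↔ (c ≠ '.' ∧ c ≠ '[') := by
  simp [notSep]

theorem altScan_eq (cs : List Char) :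
    altScan cs = (cs.takeWhile notSep, cs.dropWhile notSep) := by
  induction cs with
  | nil => simp [altScan]
  | cons c cs ih =>
    by_cases h1 : c = '.'
    · simp [altScan, notSep, h1]
    · by_cases h2 : c = '['
      · simp [altScan, notSep, h2]
      · simp [altScan, notSep, h1, h2, ih]

-- single-character prefix of a drop is an indexing fact
theorem singleton_prefix_drop (cs : List Char) (c : Char) (j : Nat) :
    ([c] <+: cs.drop j) ↔ cs[j]? = some c := by
  constructor
  · rintro ⟨t, ht⟩
    have : (cs.drop j).head? = some c := by rw [← ht]; rfl
    simpa [List.head?_drop] using this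
  · intro h
    have : (cs.drop j).head? = some c := by simpa [List.head?_drop] using h
    rcases List.head?_eq_some_iff.mp this with ⟨t, ht⟩
    exact ⟨t, by simp [ht]⟩

-- characterisation of find for a single-character needle
theorem find_single_spec (cs : List Char) (c : Char)
    (h : PySem.Chars.find cs [c] ≠ -1) :
    cs[(PySem.Chars.find cs [c]).toNat]? = some c ∧
      ∀ i < (PySem.Chars.find cs [c]).toNat, cs[i]? ≠ some c := by
  have h0 : 0 ≤ PySem.Chars.find cs [c] := by
    rcases lt_or_ge (PySem.Chars.find cs [c]) 0 with hlt | hge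
    · exfalso; exact h (by have := PySem.Chars.neg_one_le_find cs [c]; omega)
    · exact hge
  obtain ⟨h1, h2⟩ := PySem.Chars.find_spec (s := cs) (sub := [c]) h0
  refine ⟨(singleton_prefix_drop _ _ _).mp h1, ?_⟩
  intro i hi hc
  exact h2 i hi ((singleton_prefix_drop _ _ _).mpr hc)

theorem find_single_absent (cs : List Char) (c : Char)
    (h : PySem.Chars.find cs [c] = -1) : c ∉ cs := by
  intro hc
  have : [c] <:+: cs := by
    rcases List.mem_iff_append.mp hc with ⟨s, t, hst⟩
    exact ⟨s, t, by simp [hst]⟩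
  exact (PySem.Chars.find_eq_neg_one_iff cs [c]).mp h this

-- next-char-after-takeWhile fails the predicate
theorem tw_next (p : Char → Bool) : ∀ (cs : List Char) (x : Char),
    cs[(cs.takeWhile p).length]? = some x → p x = false := by
  intro cs
  induction cs with
  | nil => intro x h; simp at h
  | cons c cs ih =>
    intro x h
    by_cases hp : p c
    · simp [hp] at h; exact ih x h
    · simp [hp] at h; subst h; simpa using hp

-- the minimum separator position cuts cs exactly where takeWhile/dropWhile do
theorem min_case (cs : List Char) (m : Int) (hm0 : 0 ≤ m)
    (hsep : cs[m.toNat]? = some '.' ∨ cs[m.toNat]? = some '[')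
    (hmin : ∀ i < m.toNat, cs[i]? ≠ some '.' ∧ cs[i]? ≠ some '[') :
    PySem.List.slice cs none (some m) = cs.takeWhile (notSep) ∧
    PySem.List.slice cs (some m) none = cs.dropWhile (notSep) := by
  have hmlt : m.toNat < cs.length := by
    rcases hsep with h | h <;> exact (List.getElem?_eq_some_iff.mp h).1
  -- m.toNat = (takeWhile notSep cs).length
  have hk : m.toNat = (cs.takeWhile notSep).length := by
    rcases Nat.lt_trichotomy m.toNat (cs.takeWhile notSep).length with hlt | heq | hgt
    · -- cs[m.toNat] is inside takeWhile: p holds, contradicting hsep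
      exfalso
      have hpre := List.takeWhile_prefix (l := cs) notSep
      have hget : cs[m.toNat]'hmlt = (cs.takeWhile notSep)[m.toNat]'hlt :=
        (List.IsPrefix.getElem hpre hlt).symm
      have hpx : notSep (cs[m.toNat]'hmlt) = true := by
        rw [hget]; exact List.mem_takeWhile_imp (List.getElem_mem hlt)
      have hgetopt : cs[m.toNat]? = some (cs[m.toNat]'hmlt) := List.getElem?_eq_getElem hmlt
      rcases hsep with h | h <;>
        · rw [hgetopt] at h
          have := Option.some.inj h
          rw [this] at hpx
          rw [notSep_true_iff] at hpx
          simp at hpx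
    · exact heq
    · -- takeWhile's boundary char is a separator with index < m.toNat: contradicts hmin
      exfalso
      have hklt : (cs.takeWhile notSep).length < cs.length := Nat.lt_trans hgt hmlt
      have hgetopt : cs[(cs.takeWhile notSep).length]? = some (cs[(cs.takeWhile notSep).length]'hklt) :=
        List.getElem?_eq_getElem hklt
      have hfail := tw_next notSep cs _ hgetopt
      have hsep' : cs[(cs.takeWhile notSep).length]'hklt = '.' ∨ cs[(cs.takeWhile notSep).length]'hklt = '[' := by
        by_cases hc1 : cs[(cs.takeWhile notSep).length]'hklt = '.'
        · exact Or.inl hc1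
        · by_cases hc2 : cs[(cs.takeWhile notSep).length]'hklt = '['
          · exact Or.inr hc2
          · rw [notSep_false_iff] at hfail; tauto
      obtain ⟨h1, h2⟩ := hmin _ hgt
      rcases hsep' with h | h
      · exact h1 (by rw [hgetopt, h])
      · exact h2 (by rw [hgetopt, h])
  -- rewrite m as a natural-number cast and compute the slices
  have hm : m = ((m.toNat : Nat) : Int) := (Int.toNat_of_nonneg hm0).symm
  have htake : cs.take (cs.takeWhile notSep).length = cs.takeWhile notSep :=
    (List.prefix_iff_eq_take.mp (List.takeWhile_prefix notSep)).symm
  have hdrop : cs.drop (cs.takeWhile notSep).length = cs.dropWhile notSep := by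
    calc cs.drop (cs.takeWhile notSep).length
        = (cs.takeWhile notSep ++ cs.dropWhile notSep).drop (cs.takeWhile notSep).length := by
          rw [List.takeWhile_append_dropWhile]
      _ = cs.dropWhile notSep := List.drop_left
  constructor
  · rw [hm, PySem.List.slice_to_natCast, hk, htake]
  · rw [hm, PySem.List.slice_from_natCast, hk, hdrop]

-- A's filter-and-min tail computation equals the single forward scan, at string level
theorem tail_eq (prop : String) (cs : List Char) (hcs : prop.toList = cs) :
    (match PySem.List.min?
        (([PySem.Str.find prop ".", PySem.Str.find prop "["].filter (fun pos => pos ≠ -1)))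
        (fun x => x) with
     | some end_idx =>
        (PySem.Str.slice prop none (some end_idx), PySem.Str.slice prop (some end_idx) none)
     | none => (prop, ""))
    = (String.ofList (cs.takeWhile (notSep)),
       String.ofList (cs.dropWhile (notSep))) := by
  have hfd : PySem.Str.find prop "." = PySem.Chars.find cs ['.'] := by
    simp [hcs]
  have hfb : PySem.Str.find prop "[" = PySem.Chars.find cs ['['] := by
    simp [hcs]
  rw [hfd, hfb]
  set fd := PySem.Chars.find cs ['.'] with hfdd
  set fb := PySem.Chars.find cs ['['] with hfbd
  -- slices of prop through cs
  have hsl : ∀ m : Int, 0 ≤ m →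
      (cs[m.toNat]? = some '.' ∨ cs[m.toNat]? = some '[') →
      (∀ i < m.toNat, cs[i]? ≠ some '.' ∧ cs[i]? ≠ some '[') →
      (PySem.Str.slice prop none (some m), PySem.Str.slice prop (some m) none)
        = (String.ofList (cs.takeWhile notSep), String.ofList (cs.dropWhile notSep)) := by
    intro m hm0 hsep hmin
    obtain ⟨h1, h2⟩ := min_case cs m hm0 hsep hmin
    rw [Prod.mk.injEq]
    constructor
    · apply String.toList_inj.mp
      simp only [PySem.Str.toList_slice, PySem.Chars.slice_eq_listSlice, hcs, h1,
        String.toList_ofList]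
    · apply String.toList_inj.mp
      simp only [PySem.Str.toList_slice, PySem.Chars.slice_eq_listSlice, hcs, h2,
        String.toList_ofList]
  by_cases hd : fd = -1 <;> by_cases hb : fb = -1
  · -- no separator at all: filter is empty
    simp only [hd, hb, List.filter]
    simp only [show (decide ((-1 : Int) ≠ -1)) = false by decide]
    have hnd : '.' ∉ cs := find_single_absent cs '.' hd
    have hnb : '[' ∉ cs := find_single_absent cs '[' hb
    have hall : ∀ x ∈ cs, notSep x = true := by
      intro x hx
      refine (notSep_true_iff x).mpr ⟨fun h => hnd (h ▸ hx), fun h => hnb (h ▸ hx)⟩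
    rw [List.takeWhile_eq_self_iff.mpr hall, List.dropWhile_eq_nil_iff.mpr hall]
    simp [PySem.List.min?, String.toList_inj.mp (by simp [hcs] : prop.toList = (String.ofList cs).toList)]
  · -- only '[' occurs
    have hb0 : 0 ≤ fb := by have := PySem.Chars.neg_one_le_find cs ['[']; omega
    obtain ⟨hbs, hbm⟩ := find_single_spec cs '[' hb
    have hnd : '.' ∉ cs := find_single_absent cs '.' hd
    simp only [hd, List.filter, show (decide ((-1 : Int) ≠ -1)) = false by decide,
      show (decide (fb ≠ -1)) = true by simp [hb]]
    rw [PySem.List.min?_id_cons]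
    simp only [List.foldl]
    exact hsl fb hb0 (Or.inr hbs)
      (fun i hi => ⟨fun h => hnd (List.mem_of_getElem? h), hbm i hi⟩)
  · -- only '.' occurs
    have hd0 : 0 ≤ fd := by have := PySem.Chars.neg_one_le_find cs ['.']; omega
    obtain ⟨hds, hdm⟩ := find_single_spec cs '.' hd
    have hnb : '[' ∉ cs := find_single_absent cs '[' hb
    simp only [hb, List.filter, show (decide ((-1 : Int) ≠ -1)) = false by decide,
      show (decide (fd ≠ -1)) = true by simp [hd]]
    rw [PySem.List.min?_id_cons]
    simp only [List.foldl]
    exact hsl fd hd0 (Or.inl hds)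
      (fun i hi => ⟨hdm i hi, fun h => hnb (List.mem_of_getElem? h)⟩)
  · -- both occur: min of the two finds
    have hd0 : 0 ≤ fd := by have := PySem.Chars.neg_one_le_find cs ['.']; omega
    have hb0 : 0 ≤ fb := by have := PySem.Chars.neg_one_le_find cs ['[']; omega
    obtain ⟨hds, hdm⟩ := find_single_spec cs '.' hd
    obtain ⟨hbs, hbm⟩ := find_single_spec cs '[' hb
    simp only [List.filter, show (decide (fd ≠ -1)) = true by simp [hd],
      show (decide (fb ≠ -1)) = true by simp [hb]]
    rw [PySem.List.min?_id_cons]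
    simp only [List.foldl]
    rcases le_total fd fb with hle | hle
    · rw [min_eq_left hle]
      refine hsl fd hd0 (Or.inl hds) (fun i hi => ⟨hdm i hi, ?_⟩)
      have : i < fb.toNat := by omega
      exact hbm i this
    · rw [min_eq_right hle]
      refine hsl fb hb0 (Or.inr hbs) (fun i hi => ⟨?_, hbm i hi⟩)
      have : i < fd.toNat := by omega
      exact hdm i this

-- ===== VERDICT (by name: the statement is the Claim_ definition above) =====
set_option maxHeartbeats 1000000 in
theorem parse_property_name_py_spec : Claim_equal_parse_property_name_py := by
  unfold Claim_equal_parse_property_name_py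
  intro s _ hpre
  obtain ⟨hstart, hlen⟩ := hpre
  unfold Spec_parse_property_name_py parse_property_name_py parse_property_name_py_alt
  -- from the precondition: s.toList = '.' :: cs with cs ≠ []
  have hpfx : ('.' : Char) :: [] <+: s.toList := by
    simpa using (PySem.Chars.startswith_iff (s := s.toList) (p := ".".toList)).mp
      (by simpa using hstart)
  rcases hpfx with ⟨rest, hrest⟩
  have hlen' : s.toList.length ≠ 1 := by
    simpa [PySem.Str.len, PySem.Chars.len_eq] using hlen
  have hrest_ne : rest ≠ [] := by
    intro h; apply hlen'; rw [← hrest, h]; simp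
  have hget0 : PySem.Str.pyGet? s 0 = some '.' := by
    have : s.toList[0]? = some '.' := by rw [← hrest]; rfl
    simpa [PySem.Str.pyGet?, PySem.Chars.pyGet?_eq_listPyGet?, PySem.List.pyGet?_zero]
      using this
  simp only [hget0]
  have hne : ¬('.' : Char) ≠ '.' := by simp
  have hl1 : ¬PySem.Str.len s = 1 := by simpa [PySem.Str.len_eq] using hlen'
  rw [if_neg hne, if_neg hl1, if_neg hne, if_neg hl1]
  -- both sides work on cs := rest
  have htail : s.toList.tail = rest := by rw [← hrest]; rfl
  have hslice : (PySem.Str.slice s (some 1) none).toList = s.toList.tail := by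
    simp [PySem.Str.slice, PySem.Chars.slice_eq_listSlice, PySem.List.slice_from_one]
  rw [altScan_eq]
  exact tail_eq _ _ hslice
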